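-- pv_equiv track=rewrite | github.com/Evaan2001/NewOCRApp | functions.py | new_preliminary_correction
-- ===== SOURCE A (Python) =====
-- def new_preliminary_correction(name):
--     """
--     Perform a preliminary correction on a given name.
--
--     Args:
--         name (str): The input name string.
--
--     Returns:
--         str: The corrected name string.
--     """
--     name = name.strip()
--     new_name = name + "  "
--     for i in range(len(name)):
--         if name[i].isspace() and name[i + 1].isspace():
--             new_name = name[0:i]
--             break
--         if name[i].isalpha() == False and name[i].isspace() == False:
--             new_name = name[0:i]
--             break
--         # if (
--         #     name[i].isspace()
--         #     and name[i + 1] == "K"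
--         #     and (name[i + 2] == "K" or name[i + 2].isspace())
--         # ):
--         #     new_name = name[0:i]
--         #     break
--
--     return new_name.strip()
-- ===== SOURCE B (Python) =====
-- def new_preliminary_correction(name):
--     """Two independent scans: first invalid character, first double-space pair;
--     cut at the smaller index. Same return value as the single fused loop."""
--     name = name.strip()
--     n = len(name)
--     idx_bad = next((i for i, c in enumerate(name)
--                     if not c.isalpha() and not c.isspace()), n)
--     idx_dbl = next((i for i, (a, b) in enumerate(zip(name, name[1:]))
--                     if a.isspace() and b.isspace()), n)
--     return name[0:min(idx_bad, idx_dbl)].strip()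
-- ===== Notes on version B (the rewrite author's own statement) =====
-- stated objective: simpler
-- what changed: Replaced the single break-driven index loop (which pre-pads the string with two spaces and slices inside the loop) by two independent first-match scans (first invalid char, first double-space pair) combined with min, then one slice; no padding, no break, no in-loop reassignment.
import Mathlib
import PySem

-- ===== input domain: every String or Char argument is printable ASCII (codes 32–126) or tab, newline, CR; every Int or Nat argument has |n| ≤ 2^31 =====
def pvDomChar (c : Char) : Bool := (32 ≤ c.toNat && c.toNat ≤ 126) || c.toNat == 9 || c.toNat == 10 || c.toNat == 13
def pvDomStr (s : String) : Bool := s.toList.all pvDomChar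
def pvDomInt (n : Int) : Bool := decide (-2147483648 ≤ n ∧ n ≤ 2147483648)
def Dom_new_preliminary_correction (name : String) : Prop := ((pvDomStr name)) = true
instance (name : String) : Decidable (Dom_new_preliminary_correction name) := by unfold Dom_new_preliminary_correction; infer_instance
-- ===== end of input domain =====

-- B replaces A's single break-driven loop (which pads the string with two spaces and
-- reassigns/breaks inside the loop) by two independent first-match scans combined with
-- min, then one slice; same return value, no speed claim (objective: simpler).

-- ===== PORT A =====
-- A's for-loop with break, as structural recursion on the index i.
-- `name[i + 1]` is ported by hand as `s.getD (i+1) '!'`: Python reads it only when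
-- `name[i].isspace()` is true, and then i+1 = len(name) would raise IndexError — which
-- cannot happen, since `name` was stripped (its last character is not whitespace); the
-- non-space default '!' makes that branch condition false there, exactly as Python's
-- short-circuit does on every stripped input.
def npcLoopA (s : List Char) (i : Nat) : List Char :=
  if _h : i < s.length then
    if PySem.Chars.isspace (s.getD i ' ') && PySem.Chars.isspace (s.getD (i+1) '!') then
      PySem.List.slice s (some 0) (some (i : Int))
    else if (PySem.Chars.isalpha (s.getD i ' ') == false)
            && (PySem.Chars.isspace (s.getD i ' ') == false) then
      PySem.List.slice s (some 0) (some (i : Int))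
    else
      npcLoopA s (i+1)
  else
    s ++ [' ', ' ']
  termination_by s.length - i


def new_preliminary_correction (name : String) : String :=
  let s := PySem.Chars.strip name.toList
  String.mk (PySem.Chars.strip (npcLoopA s 0))

-- ===== PORT B =====
def npcBad (c : Char) : Bool := !(PySem.Chars.isalpha c) && !(PySem.Chars.isspace c)
def npcDbl (p : Char × Char) : Bool := PySem.Chars.isspace p.1 && PySem.Chars.isspace p.2

def new_preliminary_correction_alt (name : String) : String :=
  let s := PySem.Chars.strip name.toList
  let idxBad := s.findIdx npcBad                      -- first invalid character (default: len)
  let pairs := s.zip s.tail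
  let j := pairs.findIdx npcDbl                       -- first double-space pair
  let idxDbl := if j < pairs.length then j else s.length
  String.mk (PySem.Chars.strip (s.take (min idxBad idxDbl)))

-- ===== PRECONDITION & SPEC =====
def Spec_new_preliminary_correction (name : String) (out : String) : Prop := out = new_preliminary_correction_alt name
instance (name : String) (out : String) : Decidable (Spec_new_preliminary_correction name out) := by unfold Spec_new_preliminary_correction; infer_instance

-- ===== CLAIM (what is proved, stated in full; the proofs are below) =====
def Claim_equal_new_preliminary_correction : Prop := ∀ (name : String), Dom_new_preliminary_correction name → Spec_new_preliminary_correction name (new_preliminary_correction name)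

-- ===== LEMMAS AND PROOFS =====

def npcCut (s : List Char) : Nat :=
  min (s.findIdx npcBad)
      (if (s.zip s.tail).findIdx npcDbl < (s.zip s.tail).length
       then (s.zip s.tail).findIdx npcDbl else s.length)

theorem npc_findIdx_le {α : Type} {l : List α} {p : α → Bool} {i : Nat}
    (h2 : i < l.length) (h : p l[i] = true) : l.findIdx p ≤ i := by
  by_contra hgt
  have hf := List.not_of_lt_findIdx (p := p) (xs := l) (i := i) (by omega)
  exact Bool.noConfusion (h.symm.trans hf)

theorem npcCut_le_length (s : List Char) : npcCut s ≤ s.length := by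
  have := List.findIdx_le_length (xs := s) (p := npcBad)
  unfold npcCut
  split <;> omega

theorem npc_slice_take (s : List Char) (i : Nat) :
    PySem.List.slice s (some 0) (some (i : Int)) = s.take i := by
  rw [PySem.List.slice_toNat s (a := 0) (b := (i : Int)) (by omega) (by omega)]
  simp

theorem npc_zip_len (s : List Char) : (s.zip s.tail).length = s.length - 1 := by
  simp [List.length_zip]

theorem npc_loop_eq (s : List Char) (i : Nat) (hi : i ≤ npcCut s) :
    npcLoopA s i =
      if npcCut s < s.length then s.take (npcCut s) else s ++ [' ', ' '] := by
  have hcl := npcCut_le_length s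
  have hA : npcCut s ≤ s.findIdx npcBad := by unfold npcCut; omega
  have hB : npcCut s ≤ (if (s.zip s.tail).findIdx npcDbl < (s.zip s.tail).length
      then (s.zip s.tail).findIdx npcDbl else s.length) := by
    unfold npcCut; omega
  have hzlen := npc_zip_len s
  by_cases h : i < s.length
  · have hgi : s.getD i ' ' = s[i] := List.getD_eq_getElem s ' ' h
    have hc1 : (PySem.Chars.isspace (s.getD i ' ')
          && PySem.Chars.isspace (s.getD (i+1) '!'))
        = npcDbl ((s.zip s.tail).getD i ('!', '!')) := by
      by_cases hp : i < (s.zip s.tail).length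
      · have h1 : i + 1 < s.length := by omega
        have hpx : (s.zip s.tail).getD i ('!', '!') = (s[i], s[i+1]) := by
          rw [List.getD_eq_getElem _ _ hp, List.getElem_zip, List.getElem_tail]
        rw [hpx, hgi, List.getD_eq_getElem s '!' h1]; rfl
      · have hpx : (s.zip s.tail).getD i ('!', '!') = ('!', '!') :=
          List.getD_eq_default _ _ (by omega)
        have hgi1 : s.getD (i+1) '!' = '!' := List.getD_eq_default _ _ (by omega)
        have hbang : PySem.Chars.isspace '!' = false := by decide
        rw [hpx, hgi1, hbang]
        simp [npcDbl, hbang]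
    by_cases hd : npcDbl ((s.zip s.tail).getD i ('!', '!')) = true
    · -- double-space break: cut = i
      have hp : i < (s.zip s.tail).length := by
        by_contra hp
        rw [List.getD_eq_default _ _ (by omega)] at hd
        exact absurd hd (by decide)
      have hfle : (s.zip s.tail).findIdx npcDbl ≤ i :=
        npc_findIdx_le hp ((List.getD_eq_getElem _ _ hp) ▸ hd)
      have hcut : npcCut s = i := by
        rw [if_pos (by omega)] at hB
        omega
      rw [npcLoopA, dif_pos h, if_pos (hc1 ▸ hd), npc_slice_take, hcut, if_pos (by omega)]
    · have hd' : npcDbl ((s.zip s.tail).getD i ('!', '!')) = false :=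
        Bool.eq_false_iff.mpr hd
      by_cases hb : npcBad s[i] = true
      · -- invalid-char break: cut = i
        have hcut : npcCut s = i := by
          have := npc_findIdx_le h hb
          omega
        have hb' := hb
        simp only [npcBad, Bool.and_eq_true, Bool.not_eq_true'] at hb'
        rw [npcLoopA, dif_pos h, if_neg (by rw [hc1, hd']; exact Bool.false_ne_true),
            if_pos (by rw [hgi, hb'.1, hb'.2]; rfl),
            npc_slice_take, hcut, if_pos (by omega)]
      · -- no break at i: step
        have hb' : npcBad s[i] = false := Bool.eq_false_iff.mpr hb
        have h1 : i < s.findIdx npcBad := by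
          rcases Nat.lt_or_ge i (s.findIdx npcBad) with h' | h'
          · exact h'
          · exfalso
            have heq : s.findIdx npcBad = i := by omega
            have hgot := List.findIdx_getElem (xs := s) (p := npcBad) (w := heq ▸ h)
            simp only [heq] at hgot
            exact Bool.noConfusion (hgot.symm.trans hb')
        have h2 : i < (if (s.zip s.tail).findIdx npcDbl < (s.zip s.tail).length
            then (s.zip s.tail).findIdx npcDbl else s.length) := by
          by_cases hq : (s.zip s.tail).findIdx npcDbl < (s.zip s.tail).length
          · rw [if_pos hq] at hB ⊢
            rcases Nat.lt_or_ge i ((s.zip s.tail).findIdx npcDbl) with h' | h'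
            · exact h'
            · exfalso
              have heq : (s.zip s.tail).findIdx npcDbl = i := by omega
              have hp : i < (s.zip s.tail).length := heq ▸ hq
              have hgot := List.findIdx_getElem (xs := s.zip s.tail) (p := npcDbl) (w := hq)
              simp only [heq] at hgot
              rw [List.getD_eq_getElem _ _ hp] at hd'
              exact Bool.noConfusion (hgot.symm.trans hd')
          · rw [if_neg hq] at ⊢
            omega
        have hstep : i + 1 ≤ npcCut s := by unfold npcCut; omega
        rw [npcLoopA, dif_pos h, if_neg (by rw [hc1, hd']; exact Bool.false_ne_true),
            if_neg (by
              rw [hgi]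
              simp only [npcBad, Bool.and_eq_true, Bool.not_eq_true'] at hb
              rcases Bool.eq_false_or_eq_true (PySem.Chars.isalpha s[i]) with ha | ha <;>
                rcases Bool.eq_false_or_eq_true (PySem.Chars.isspace s[i]) with hs | hs <;>
                  simp [ha, hs] at hb ⊢)]
        exact npc_loop_eq s (i+1) hstep
  · have hcut : npcCut s = i := by omega
    rw [npcLoopA, dif_neg h, if_neg (by omega)]
  termination_by s.length - i

theorem npc_strip_append_spaces (s : List Char) :
    PySem.Chars.strip (s ++ [' ', ' ']) = PySem.Chars.strip s := by
  simp only [PySem.Chars.strip, PySem.Chars.lstrip, PySem.Chars.rstrip,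
    List.dropWhile_append]
  split
  · next he =>
    simp only [List.isEmpty_iff] at he
    rw [he]
    rw [show List.dropWhile PySem.Chars.isspace [' ', ' '] = ([] : List Char) from rfl]
  · next he =>
    simp only [List.reverse_append]
    rw [show (([' ', ' '] : List Char).reverse ++ (List.dropWhile PySem.Chars.isspace s).reverse
          = ' ' :: ' ' :: (List.dropWhile PySem.Chars.isspace s).reverse) from rfl]
    rw [List.dropWhile_cons_of_pos (by decide), List.dropWhile_cons_of_pos (by decide)]

theorem npc_key (s : List Char) :
    PySem.Chars.strip (npcLoopA s 0) = PySem.Chars.strip (s.take (npcCut s)) := by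
  rw [npc_loop_eq s 0 (Nat.zero_le _)]
  by_cases hc : npcCut s < s.length
  · rw [if_pos hc]
  · have hlen : npcCut s = s.length := le_antisymm (npcCut_le_length s) (by omega)
    rw [if_neg hc, hlen, List.take_length, npc_strip_append_spaces]

-- ===== VERDICT (by name: the statement is the Claim_ definition above) =====
theorem new_preliminary_correction_spec : Claim_equal_new_preliminary_correction := by
  intro name _
  show new_preliminary_correction name = new_preliminary_correction_alt name
  exact congrArg String.mk (npc_key (PySem.Chars.strip name.toList))
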